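-- pv_equiv track=rewrite | github.com/brkdnmz/inzvaland | Do The Math/#9/closer-to-you/sol.py | solve
-- ===== SOURCE A (Python) =====
-- def solve(n: int):
--     ans = n
--     for i in range(2, n + 1):
--         if i * i > n:
--             break
--         while n % i == 0:
--             n //= i
--             ans += n
--     if n > 1:
--         ans += 1
--     return ans
-- ===== SOURCE B (Python) =====
-- def _spf(m):
--     # smallest prime factor of m (m >= 2), by trial division
--     d = 2
--     while d * d <= m:
--         if m % d == 0:
--             return d
--         d += 1
--     return m
--
-- def solve(n):
--     if n <= 1:
--         return n
--     ans = n
--     m = n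
--     while m > 1:
--         m //= _spf(m)
--         ans += m
--     return ans
-- ===== Notes on version B (the rewrite author's own statement) =====
-- stated objective: alternative
-- what changed: A runs one sqrt-bounded trial-division sweep dividing out each candidate and patches the leftover prime with a trailing increment of the answer; B instead repeatedly extracts the smallest prime factor with a helper and divides it out until the number is fully factored, so no correction step exists.
import Mathlib
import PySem

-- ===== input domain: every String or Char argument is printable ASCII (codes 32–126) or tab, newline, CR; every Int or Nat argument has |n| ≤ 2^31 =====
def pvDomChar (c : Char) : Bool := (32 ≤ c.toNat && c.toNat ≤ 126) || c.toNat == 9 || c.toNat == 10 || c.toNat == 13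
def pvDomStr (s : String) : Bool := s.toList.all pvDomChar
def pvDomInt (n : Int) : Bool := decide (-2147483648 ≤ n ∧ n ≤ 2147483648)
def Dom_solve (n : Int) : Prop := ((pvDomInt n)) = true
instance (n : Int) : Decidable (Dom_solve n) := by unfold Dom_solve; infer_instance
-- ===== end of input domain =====

-- B replaces A's sqrt-bounded trial-division loop (with its trailing leftover-prime
-- correction) by repeated extraction of the smallest prime factor with a helper and
-- division until the number is fully factored, so no correction step exists; objective:
-- alternative decomposition of comparable cost.  All while-loops are totalized with a
-- fuel counter that is provably sufficient on every input (see the *_spec lemmas below).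

-- ===== PORT A =====

-- inner `while n % i == 0: n //= i; ans += n`; fuel n.toNat bounds the number of divisions
def pySolveInner (fuel : Nat) (i n ans : Int) : Int × Int :=
  match fuel with
  | 0 => (n, ans)
  | Nat.succ f =>
    if PySem.Int.mod n i = 0 then
      pySolveInner f i (PySem.Int.floordiv n i) (ans + PySem.Int.floordiv n i)
    else (n, ans)

-- `for i in range(2, n+1): if i*i > n: break; <inner>`, with `cnt` the number of
-- range elements still to be produced
def pySolveOuter (i : Int) (cnt : Nat) (n ans : Int) : Int × Int :=
  match cnt with
  | 0 => (n, ans)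
  | Nat.succ c =>
    if i * i > n then (n, ans)
    else
      let p := pySolveInner n.toNat i n ans
      pySolveOuter (i + 1) c p.1 p.2

def solve (n : Int) : Int :=
  let r := pySolveOuter 2 (n - 1).toNat n n
  if r.1 > 1 then r.2 + 1 else r.2

-- ===== PORT B =====

-- helper _spf: `d = 2; while d*d <= m: if m % d == 0: return d; d += 1; return m`
def altSpf (fuel : Nat) (d m : Int) : Int :=
  match fuel with
  | 0 => m
  | Nat.succ f =>
    if d * d ≤ m then
      if PySem.Int.mod m d = 0 then d else altSpf f (d + 1) m
    else m

-- `while m > 1: m //= _spf(m); ans += m`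
def loopB (fuel : Nat) (m ans : Int) : Int :=
  match fuel with
  | 0 => ans
  | Nat.succ f =>
    if 1 < m then
      let m' := PySem.Int.floordiv m (altSpf m.toNat 2 m)
      loopB f m' (ans + m')
    else ans

def solve_alt (n : Int) : Int :=
  if n ≤ 1 then n else loopB n.toNat n n

-- ===== PRECONDITION & SPEC =====
def Spec_solve (n : Int) (out : Int) : Prop := out = solve_alt n
instance (n : Int) (out : Int) : Decidable (Spec_solve n out) := by unfold Spec_solve; infer_instance

-- ===== CLAIM (what is proved, stated in full; the proofs are below) =====
def Claim_equal_solve : Prop := ∀ (n : Int), Dom_solve n → Spec_solve n (solve n)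

-- ===== LEMMAS AND PROOFS =====

theorem pvFloordivBounds (a b : Int) (ha : 0 < a) (hb : 1 < b) :
    0 ≤ PySem.Int.floordiv a b ∧ PySem.Int.floordiv a b < a :=
  ⟨(PySem.Int.le_floordiv_iff_mul_le (by omega)).mpr (by omega),
   (PySem.Int.floordiv_lt_iff_lt_mul (by omega)).mpr (by nlinarith)⟩

-- reference function: sum of the successive quotients while stripping smallest prime factors
def sumQuot (m : Nat) : Nat :=
  if _h : 2 ≤ m then m / m.minFac + sumQuot (m / m.minFac) else 0
  termination_by m
  decreasing_by
    exact Nat.div_lt_self (by omega) (Nat.minFac_prime (by omega : m ≠ 1)).one_lt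

theorem sumQuot_le_one {m : Nat} (h : m ≤ 1) : sumQuot m = 0 := by
  rw [sumQuot, dif_neg (by omega)]

theorem minFac_eq_of (m d : Int) (hm : 1 ≤ m) (hd : 2 ≤ d) (hdvd : d ∣ m)
    (hmin : ∀ e : Int, 2 ≤ e → e < d → ¬ e ∣ m) : (m.toNat.minFac : Int) = d := by
  have hmd : d ≤ m := Int.le_of_dvd (by omega) hdvd
  have hmc : ((m.toNat : Int)) = m := Int.toNat_of_nonneg (by omega)
  have hdc : ((d.toNat : Int)) = d := Int.toNat_of_nonneg (by omega)
  have hdvdN : d.toNat ∣ m.toNat := by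
    rw [← Int.natCast_dvd_natCast, hmc, hdc]; exact hdvd
  have h1 : m.toNat.minFac ≤ d.toNat := Nat.minFac_le_of_dvd (by omega) hdvdN
  have h2 : 2 ≤ m.toNat.minFac := (Nat.minFac_prime (by omega : m.toNat ≠ 1)).two_le
  have h3 : ¬ m.toNat.minFac < d.toNat := by
    intro hlt
    refine hmin (m.toNat.minFac : Int) (by exact_mod_cast h2) (by omega) ?_
    have h4 := Nat.minFac_dvd m.toNat
    rw [← hmc]; exact_mod_cast h4
  have h5 : m.toNat.minFac = d.toNat := by omega
  rw [h5, hdc]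

-- under the loop invariant (no divisor below d) the break condition d*d > m makes m prime
theorem prime_of_no_small_div (m d : Int) (hm : 2 ≤ m) (hd : 2 ≤ d) (hdd : m < d * d)
    (hmin : ∀ e : Int, 2 ≤ e → e < d → ¬ e ∣ m) : (m.toNat.minFac : Int) = m := by
  have hmc : ((m.toNat : Int)) = m := Int.toNat_of_nonneg (by omega)
  have h2 : 2 ≤ m.toNat.minFac := (Nat.minFac_prime (by omega : m.toNat ≠ 1)).two_le
  have hge : d ≤ (m.toNat.minFac : Int) := by
    by_contra hlt
    refine hmin (m.toNat.minFac : Int) (by exact_mod_cast h2) (by omega) ?_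
    have h4 := Nat.minFac_dvd m.toNat
    rw [← hmc]; exact_mod_cast h4
  have hprime : Nat.Prime m.toNat := by
    by_contra hnp
    have hsq := Nat.minFac_sq_le_self (n := m.toNat) (by omega) hnp
    have h5 : ((m.toNat.minFac ^ 2 : Nat) : Int) ≤ ((m.toNat : Int)) := by exact_mod_cast hsq
    rw [hmc] at h5
    push_cast at h5
    nlinarith
  rw [hprime.minFac_eq, hmc]

theorem quot_cast (m p : Int) (hm : 1 ≤ m) (hp : 2 ≤ p) (hfac : (m.toNat.minFac : Int) = p) :
    m.toNat / m.toNat.minFac = (PySem.Int.floordiv m p).toNat := by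
  have hmc : ((m.toNat : Int)) = m := Int.toNat_of_nonneg (by omega)
  have hpc : ((p.toNat : Int)) = p := Int.toNat_of_nonneg (by omega)
  have hfn : m.toNat.minFac = p.toNat := by omega
  have h1 : ((m.toNat / m.toNat.minFac : Nat) : Int) = PySem.Int.floordiv m p := by
    rw [hfn, PySem.Int.floordiv_eq_ediv_of_pos (by omega), Int.natCast_div, hmc, hpc]
  rw [← h1, Int.toNat_natCast]

theorem sumQuot_step (m : Int) (hm : 2 ≤ m) :
    sumQuot m.toNat = m.toNat / m.toNat.minFac + sumQuot (m.toNat / m.toNat.minFac) := by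
  conv_lhs => rw [sumQuot]
  rw [dif_pos (by omega : 2 ≤ m.toNat)]

theorem inner_spec : ∀ (fuel : Nat) (i m ans : Int), 2 ≤ i → 1 ≤ m → m.toNat ≤ fuel →
    (∀ e : Int, 2 ≤ e → e < i → ¬ e ∣ m) →
    1 ≤ (pySolveInner fuel i m ans).1 ∧ (pySolveInner fuel i m ans).1 ≤ m ∧
    (∀ e : Int, 2 ≤ e → e < i + 1 → ¬ e ∣ (pySolveInner fuel i m ans).1) ∧
    (pySolveInner fuel i m ans).2 + (sumQuot (pySolveInner fuel i m ans).1.toNat : Int)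
      = ans + (sumQuot m.toNat : Int) := by
  intro fuel
  induction fuel with
  | zero =>
    intro i m ans hi hm hf hmin
    omega
  | succ f ih =>
    intro i m ans hi hm hf hmin
    rw [pySolveInner]
    by_cases h0 : PySem.Int.mod m i = 0
    · rw [if_pos h0]
      have hdvd : i ∣ m := (PySem.Int.mod_eq_zero_iff_dvd m i).mp h0
      have him : i ≤ m := Int.le_of_dvd (by omega) hdvd
      have hb := pvFloordivBounds m i (by omega) (by omega)
      have hm'1 : 1 ≤ PySem.Int.floordiv m i :=
        (PySem.Int.le_floordiv_iff_mul_le (by omega)).mpr (by omega)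
      have hfd : PySem.Int.floordiv m i = m / i :=
        PySem.Int.floordiv_eq_ediv_of_pos (by omega)
      have hdvd' : PySem.Int.floordiv m i ∣ m := by
        rw [hfd]; exact ⟨i, (Int.ediv_mul_cancel hdvd).symm⟩
      have hmin' : ∀ e : Int, 2 ≤ e → e < i → ¬ e ∣ PySem.Int.floordiv m i := by
        intro e he hei hed
        exact hmin e he hei (hed.trans hdvd')
      obtain ⟨c1, c2, c3, c4⟩ := ih i (PySem.Int.floordiv m i) (ans + PySem.Int.floordiv m i)
        hi hm'1 (by omega) hmin'
      refine ⟨c1, by omega, c3, ?_⟩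
      rw [c4]
      have hmf : ((m.toNat.minFac : Int)) = i := minFac_eq_of m i (by omega) hi hdvd hmin
      have hq := quot_cast m i (by omega) hi hmf
      rw [sumQuot_step m (by omega), hq]
      have hfc : (((PySem.Int.floordiv m i).toNat : Int)) = PySem.Int.floordiv m i :=
        Int.toNat_of_nonneg (by omega)
      push_cast
      rw [hfc]
      ring
    · rw [if_neg h0]
      have hnd : ¬ i ∣ m := fun hdvd => h0 ((PySem.Int.mod_eq_zero_iff_dvd m i).mpr hdvd)
      refine ⟨hm, le_refl m, ?_, by simp⟩
      intro e he hei
      rcases lt_or_eq_of_le (by omega : e ≤ i) with hlt | heq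
      · exact hmin e he hlt
      · rw [heq]; exact hnd

theorem altSpf_two_le : ∀ (fuel : Nat) (d m : Int), 2 ≤ d → 2 ≤ m → 2 ≤ altSpf fuel d m := by
  intro fuel
  induction fuel with
  | zero => intro d m _ hm; rw [altSpf]; exact hm
  | succ f ih =>
    intro d m hd hm
    rw [altSpf]
    by_cases h : d * d ≤ m
    · rw [if_pos h]
      by_cases h0 : PySem.Int.mod m d = 0
      · rw [if_pos h0]; exact hd
      · rw [if_neg h0]; exact ih (d + 1) m (by omega) hm
    · rw [if_neg h]; exact hm

theorem altSpf_eq_minFac : ∀ (fuel : Nat) (d m : Int), 2 ≤ d → 2 ≤ m →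
    m < (d + fuel) * (d + fuel) →
    (∀ e : Int, 2 ≤ e → e < d → ¬ e ∣ m) → altSpf fuel d m = (m.toNat.minFac : Int) := by
  intro fuel
  induction fuel with
  | zero =>
    intro d m hd hm hfuel hmin
    rw [altSpf]
    simp only [Nat.cast_zero, add_zero] at hfuel
    exact (prime_of_no_small_div m d hm hd hfuel hmin).symm
  | succ f ih =>
    intro d m hd hm hfuel hmin
    rw [altSpf]
    by_cases h : d * d ≤ m
    · rw [if_pos h]
      by_cases h0 : PySem.Int.mod m d = 0
      · rw [if_pos h0]
        exact (minFac_eq_of m d (by omega) hd ((PySem.Int.mod_eq_zero_iff_dvd m d).mp h0) hmin).symm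
      · rw [if_neg h0]
        refine ih (d + 1) m (by omega) hm ?_ ?_
        · have he : d + ((Nat.succ f : Nat) : Int) = (d + 1) + (f : Int) := by push_cast; ring
          rw [he] at hfuel
          exact hfuel
        · intro e he hlt
          rcases lt_or_eq_of_le (by omega : e ≤ d) with h1 | h2
          · exact hmin e he h1
          · rw [h2]
            intro hdvd
            exact h0 ((PySem.Int.mod_eq_zero_iff_dvd m d).mpr hdvd)
    · rw [if_neg h]
      exact (prime_of_no_small_div m d hm hd (by omega) hmin).symm

theorem outer_spec : ∀ (cnt : Nat) (i m ans : Int), 2 ≤ i → 1 ≤ m → m < i + cnt →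
    (∀ e : Int, 2 ≤ e → e < i → ¬ e ∣ m) →
    (if (pySolveOuter i cnt m ans).1 > 1 then (pySolveOuter i cnt m ans).2 + 1
     else (pySolveOuter i cnt m ans).2) = ans + (sumQuot m.toNat : Int) := by
  intro cnt
  induction cnt with
  | zero =>
    intro i m ans hi hm hcnt hmin
    have hm1 : m = 1 := by
      by_contra hne
      exact hmin m (by omega) (by push_cast at hcnt; omega) dvd_rfl
    subst hm1
    simp [pySolveOuter, sumQuot_le_one]
  | succ c ih =>
    intro i m ans hi hm hcnt hmin
    rw [pySolveOuter]
    by_cases hbr : i * i > m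
    · rw [if_pos hbr]
      by_cases hm1 : m > 1
      · rw [if_pos hm1]
        have hmf := prime_of_no_small_div m i (by omega) hi (by omega) hmin
        rw [sumQuot_step m (by omega)]
        have hfac : m.toNat.minFac = m.toNat := by omega
        rw [hfac, Nat.div_self (by omega), sumQuot_le_one (by omega)]
        push_cast; omega
      · rw [if_neg hm1]
        rw [sumQuot_le_one (by omega)]
        push_cast; omega
    · rw [if_neg hbr]
      obtain ⟨c1, c2, c3, c4⟩ := inner_spec m.toNat i m ans hi hm (le_refl _) hmin
      have hrec := ih (i + 1) (pySolveInner m.toNat i m ans).1 (pySolveInner m.toNat i m ans).2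
        (by omega) c1 (by push_cast at hcnt ⊢; omega) c3
      simp only at hrec ⊢
      rw [hrec, c4]

theorem loopB_spec : ∀ (fuel : Nat) (m ans : Int), m.toNat ≤ fuel →
    loopB fuel m ans = ans + (sumQuot m.toNat : Int) := by
  intro fuel
  induction fuel with
  | zero =>
    intro m ans hf
    rw [loopB, sumQuot_le_one (by omega)]
    push_cast; omega
  | succ f ih =>
    intro m ans hf
    rw [loopB]
    by_cases h : 1 < m
    · rw [if_pos h]
      have hsp : 2 ≤ altSpf m.toNat 2 m := altSpf_two_le m.toNat 2 m (by omega) (by omega)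
      have hmf : altSpf m.toNat 2 m = ((m.toNat.minFac : Int)) := by
        refine altSpf_eq_minFac m.toNat 2 m (by omega) (by omega) ?_ (by intro e he hlt; omega)
        have hc : ((m.toNat : Int)) = m := Int.toNat_of_nonneg (by omega)
        rw [hc]
        nlinarith
      have hq := quot_cast m (altSpf m.toNat 2 m) (by omega) hsp hmf.symm
      have hb := pvFloordivBounds m (altSpf m.toNat 2 m) (by omega) (by omega)
      rw [ih _ _ (by omega), sumQuot_step m (by omega), hq]
      have hfc : (((PySem.Int.floordiv m (altSpf m.toNat 2 m)).toNat : Int))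
          = PySem.Int.floordiv m (altSpf m.toNat 2 m) := Int.toNat_of_nonneg (by omega)
      push_cast
      rw [hfc]
      ring
    · rw [if_neg h, sumQuot_le_one (by omega)]
      push_cast; omega

-- ===== VERDICT (by name: the statement is the Claim_ definition above) =====
theorem solve_spec : Claim_equal_solve := by
  intro n _
  unfold Spec_solve solve solve_alt
  by_cases hn : n ≤ 1
  · have hc : (n - 1).toNat = 0 := by omega
    rw [hc]
    simp [pySolveOuter, if_pos hn]
    omega
  · rw [if_neg hn, loopB_spec n.toNat n n (le_refl _)]
    have hcnt : n < 2 + ((n - 1).toNat : Int) := by omega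
    have hmain := outer_spec (n - 1).toNat 2 n n (by omega) (by omega) hcnt
      (by intro e he hlt; omega)
    simp only at hmain ⊢
    rw [hmain]
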